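-- pv_equiv track=rewrite | github.com/juandelima/Password-validation---Python | password_validation.py | cek_simbol
-- ===== SOURCE A (Python) =====
-- def create_lists(kata):
--    new_arr = []
--    for kata1 in kata:
--       for huruf in kata1:
--          new_arr.append(huruf)
--    return new_arr
--
-- def sorting_kata(password):
--    arr = create_lists(password)
--    for index in range(1, len(password)):
--       current_word = arr[index]
--       index_kata = index
--       while index_kata > 0 and arr[index_kata - 1] > current_word:
--          arr[index_kata] = arr[index_kata - 1]
--          index_kata -= 1
--       arr[index_kata] = current_word
--    return arr
--
-- def pencarian_huruf(password, cari): #teknik rekursif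
--    arr = sorting_kata(password)
--    if len(arr) == 0:
--       return False
--    else:
--       split_word = len(arr) // 2
--       if arr[split_word ] == cari:
--          return True
--       else:
--          if cari < arr[split_word]:
--             return pencarian_huruf(arr[:split_word], cari)
--          else:
--             return pencarian_huruf(arr[split_word + 1:], cari)
--
-- def cek_simbol(password):
--    sym = "~!@#$%^&*()_{}'|:;"
--    lists_sym = create_lists(sym)
--    check = False
--    for simbol in range(len(lists_sym)):
--       if pencarian_huruf(password, lists_sym[simbol]) != check:
--          check = True
--    return check
-- ===== SOURCE B (Python) =====
-- def cek_simbol(password):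
--    sym = "~!@#$%^&*()_{}'|:;"
--    for huruf in password:
--       if huruf in sym:
--          return True
--    return False
-- ===== Notes on version B (the rewrite author's own statement) =====
-- stated objective: simpler
-- what changed: Replaces A's flatten + index-based insertion sort + recursive binary search per symbol (18 searches, each re-sorting its slice) with a single short-circuiting linear scan over the password testing each character against the symbol string.
import Mathlib
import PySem

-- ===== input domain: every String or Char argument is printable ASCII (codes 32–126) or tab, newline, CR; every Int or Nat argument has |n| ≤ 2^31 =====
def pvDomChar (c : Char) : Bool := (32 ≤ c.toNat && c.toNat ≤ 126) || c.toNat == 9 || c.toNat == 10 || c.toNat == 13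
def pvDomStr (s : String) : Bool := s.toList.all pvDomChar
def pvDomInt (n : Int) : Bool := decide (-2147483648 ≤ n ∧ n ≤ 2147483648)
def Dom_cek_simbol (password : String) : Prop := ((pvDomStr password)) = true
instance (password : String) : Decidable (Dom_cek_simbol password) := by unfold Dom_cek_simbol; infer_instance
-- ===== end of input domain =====

-- B replaces A's flatten + insertion-sort + per-symbol recursive binary search by one
-- short-circuiting linear scan of the password against the symbol string; same result.

-- ===== PORT A =====
-- create_lists: for a string (or list of chars) every element is a 1-char string, so the
-- nested loop appends each character once.
def createLists (kata : List Char) : List Char :=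
  kata.foldl (fun acc k => acc ++ [k]) []

-- the inner while-loop of sorting_kata plus the final `arr[index_kata] = current_word`;
-- `arr[index_kata - 1] > current_word` is `cur < arr[k]`. Indices are always in range
-- (len(arr) == len(password)), so getD's default is never used.
def shiftA : List Char → Nat → Char → List Char
  | arr, 0, cur => arr.set 0 cur
  | arr, k+1, cur =>
      if cur < arr.getD k ' ' then shiftA (arr.set (k+1) (arr.getD k ' ')) k cur
      else arr.set (k+1) cur

-- sorting_kata: insertion sort over indices range(1, len(password))
def sortingKata (password : List Char) : List Char :=
  (List.range' 1 (password.length - 1)).foldl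
    (fun arr index => shiftA arr index (arr.getD index ' '))
    (createLists password)

theorem shiftA_length (k : Nat) (arr : List Char) (cur : Char) :
    (shiftA arr k cur).length = arr.length := by
  induction k generalizing arr with
  | zero => simp [shiftA]
  | succ k ih => simp only [shiftA]; split <;> simp [ih]

theorem foldl_shiftA_length (idxs : List Nat) (arr : List Char) :
    (idxs.foldl (fun a i => shiftA a i (a.getD i ' ')) arr).length = arr.length := by
  induction idxs generalizing arr with
  | nil => rfl
  | cons i t ih => rw [List.foldl_cons, ih, shiftA_length]

theorem foldl_append_singleton (l acc : List Char) :
    l.foldl (fun a k => a ++ [k]) acc = acc ++ l := by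
  induction l generalizing acc with
  | nil => simp
  | cons c t ih => simp [List.foldl, ih]

theorem createLists_eq (l : List Char) : createLists l = l := by
  rw [createLists, foldl_append_singleton]; simp

theorem sortingKata_length (l : List Char) : (sortingKata l).length = l.length := by
  rw [sortingKata, createLists_eq, foldl_shiftA_length]

-- pencarian_huruf: recursive binary search (re-sorting each slice); slices arr[:m], arr[m+1:]
-- have nonnegative bounds so they are take/drop exactly.
def pencarian (password : List Char) (cari : Char) : Bool :=
  if h : (sortingKata password).length = 0 then false
  else if (sortingKata password).getD ((sortingKata password).length / 2) ' ' = cari then true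
  else if cari < (sortingKata password).getD ((sortingKata password).length / 2) ' ' then
    pencarian ((sortingKata password).take ((sortingKata password).length / 2)) cari
  else
    pencarian ((sortingKata password).drop ((sortingKata password).length / 2 + 1)) cari
termination_by password.length
decreasing_by
  · have := sortingKata_length password
    simp [sortingKata_length]; omega
  · have := sortingKata_length password
    simp [sortingKata_length]; omega

def cek_simbol (password : String) : Bool :=
  (List.range (createLists "~!@#$%^&*()_{}'|:;".toList).length).foldl
    (fun check simbol =>
      if pencarian password.toList ((createLists "~!@#$%^&*()_{}'|:;".toList).getD simbol ' ') ≠ check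
      then true else check)
    false

-- ===== PORT B =====
-- the for-loop of Source B with its early return
def cekGo : List Char → Bool
  | [] => false
  | c :: rest => if "~!@#$%^&*()_{}'|:;".toList.contains c then true else cekGo rest

def cek_simbol_alt (password : String) : Bool := cekGo password.toList

-- ===== PRECONDITION & SPEC =====
def Spec_cek_simbol (password : String) (out : Bool) : Prop := out = cek_simbol_alt password
instance (password : String) (out : Bool) : Decidable (Spec_cek_simbol password out) := by unfold Spec_cek_simbol; infer_instance

-- ===== CLAIM (what is proved, stated in full; the proofs are below) =====
def Claim_equal_cek_simbol : Prop := ∀ (password : String), Dom_cek_simbol password → Spec_cek_simbol password (cek_simbol password)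

-- ===== LEMMAS AND PROOFS =====

theorem shift_spec (k : Nat) : ∀ (arr : List Char) (cur : Char), k < arr.length →
    ((arr.take k).Sorted (· ≤ ·)) →
    List.Perm ((shiftA arr k cur).take (k+1)) (cur :: arr.take k) ∧
    ((shiftA arr k cur).take (k+1)).Sorted (· ≤ ·) ∧
    (shiftA arr k cur).drop (k+1) = arr.drop (k+1) := by
  induction k with
  | zero =>
    intro arr cur hk _
    cases arr with
    | nil => simp at hk
    | cons a t => simp [shiftA, List.sorted_singleton]
  | succ k ih =>
    intro arr cur hk hsort
    have hk' : k < arr.length := by omega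
    have hget : arr.getD k ' ' = arr[k] := List.getD_eq_getElem arr ' ' hk'
    have htk : arr.take (k+1) = arr.take k ++ [arr[k]] := List.take_succ_eq_append_getElem hk'
    have hsort1 : (arr.take (k+1)).Sorted (· ≤ ·) := hsort
    have hsortk : (arr.take k).Sorted (· ≤ ·) := by
      rw [htk] at hsort1
      exact (List.pairwise_append.mp hsort1).1
    have hle : ∀ x ∈ arr.take k, x ≤ arr[k] := by
      rw [htk] at hsort1
      intro x hx
      exact (List.pairwise_append.mp hsort1).2.2 x hx _ (by simp)
    simp only [shiftA]
    split
    · -- while-loop body: shift arr[k] to position k+1, recurse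
      rename_i hlt
      rw [hget] at hlt
      set arr' := arr.set (k+1) (arr.getD k ' ') with harr'
      have hk'' : k < arr'.length := by simp [harr']; omega
      have htake' : arr'.take (k+1) = arr.take (k+1) := List.take_set_of_le (le_refl _)
      have htakek : arr'.take k = arr.take k := List.take_set_of_le (by omega)
      obtain ⟨ihp, ihs, ihd⟩ := ih arr' cur hk'' (by rw [htakek]; exact hsortk)
      rw [htakek] at ihp
      set r := shiftA arr' k cur with hr
      have hlenr : r.length = arr.length := by rw [hr, shiftA_length]; simp [harr']
      have hk2 : k+1 < r.length := by omega
      have hk2' : k+1 < arr'.length := by simp [harr']; omega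
      have hdropcons : r[k+1]'hk2 :: r.drop (k+1+1) = arr'[k+1]'hk2' :: arr'.drop (k+1+1) := by
        rw [← List.drop_eq_getElem_cons hk2, ← List.drop_eq_getElem_cons hk2', ihd]
      have hrget : r[k+1]'hk2 = arr[k] := by
        have h1 := (List.cons.injEq _ _ _ _).mp hdropcons |>.1
        have h2 : arr'[k+1]'hk2' = arr[k] := by
          simp only [harr', List.getElem_set_self]
          exact hget
        exact h1.trans h2
      have hrdrop : r.drop (k+1+1) = arr.drop (k+1+1) := by
        have h2 := (List.cons.injEq _ _ _ _).mp hdropcons |>.2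
        rw [h2, harr', List.drop_set_of_lt (by omega)]
      have hrtake : r.take (k+1+1) = r.take (k+1) ++ [arr[k]] := by
        rw [List.take_succ_eq_append_getElem hk2, hrget]
      refine ⟨?_, ?_, ?_⟩
      · rw [hrtake, htk]
        exact (List.perm_append_singleton _ _).trans
          ((ihp.cons _).trans ((List.Perm.swap _ _ _).trans
            (((List.perm_append_singleton _ _).symm).cons _)))
      · rw [hrtake]
        refine List.pairwise_append.mpr ⟨ihs, by simp, ?_⟩
        intro x hx y hy
        simp at hy; subst hy
        have hx' : x ∈ cur :: arr.take k := ihp.mem_iff.mp hx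
        rcases List.mem_cons.mp hx' with h | h
        · subst h; exact le_of_lt hlt
        · exact hle x h
      · exact hrdrop
    · rename_i hnlt
      rw [hget] at hnlt
      have hcle : arr[k] ≤ cur := le_of_not_gt hnlt
      have hk2 : k+1 < (arr.set (k+1) cur).length := by simp; omega
      have hstake : (arr.set (k+1) cur).take (k+1+1) = arr.take (k+1) ++ [cur] := by
        rw [List.take_succ_eq_append_getElem hk2, List.take_set_of_le (le_refl _),
          List.getElem_set_self]
      refine ⟨?_, ?_, ?_⟩
      · rw [hstake]; exact List.perm_append_singleton _ _
      · rw [hstake]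
        refine List.pairwise_append.mpr ⟨hsort1, by simp, ?_⟩
        intro x hx y hy
        simp at hy; subst hy
        rw [htk] at hx
        rcases List.mem_append.mp hx with h | h
        · exact le_trans (hle x h) hcle
        · simp at h; subst h; exact hcle
      · exact List.drop_set_of_lt (by omega)

theorem fold_inv (m : Nat) : ∀ (s : Nat) (arr a' : List Char),
    a'.length = arr.length →
    ((a'.take s).Sorted (· ≤ ·)) → List.Perm (a'.take s) (arr.take s) → a'.drop s = arr.drop s →
    s + m ≤ arr.length →
    (((List.range' s m).foldl (fun a i => shiftA a i (a.getD i ' ')) a').take (s+m)).Sorted (· ≤ ·) ∧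
    List.Perm (((List.range' s m).foldl (fun a i => shiftA a i (a.getD i ' ')) a').take (s+m)) (arr.take (s+m)) ∧
    ((List.range' s m).foldl (fun a i => shiftA a i (a.getD i ' ')) a').drop (s+m) = arr.drop (s+m) := by
  induction m with
  | zero =>
    intro s arr a' hlen hsrt hperm hdrop _
    -- with s elements processed and none left, a'.take s is the whole claim
    exact ⟨by simpa using hsrt, by simpa using hperm, by simpa using hdrop⟩
  | succ m ih =>
    intro s arr a' hlen hsrt hperm hdrop hbound
    have hs : s < a'.length := by omega
    rw [List.range'_succ, List.foldl_cons]
    -- the element inserted at step s is arr[s] (the suffix from s on is untouched)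
    have hget : a'.getD s ' ' = a'[s] := List.getD_eq_getElem a' ' ' hs
    have hsarr : s < arr.length := by omega
    have hgeq : a'[s]'hs = arr[s]'hsarr := by
      have h1 := List.drop_eq_getElem_cons hs
      have h2 := List.drop_eq_getElem_cons hsarr
      rw [hdrop, h2] at h1
      exact (((List.cons.injEq _ _ _ _).mp h1).1).symm
    obtain ⟨sp, ss, sd⟩ := shift_spec s a' (a'.getD s ' ') hs hsrt
    set a'' := shiftA a' s (a'.getD s ' ') with ha''
    have hlen'' : a''.length = arr.length := by rw [ha'', shiftA_length]; exact hlen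
    have hdrop'' : a''.drop (s+1) = arr.drop (s+1) := by
      rw [sd]
      have := congrArg (List.drop 1) hdrop
      simpa [List.drop_drop] using this
    have hperm'' : List.Perm (a''.take (s+1)) (arr.take (s+1)) := by
      refine sp.trans ?_
      rw [hget, hgeq, List.take_succ_eq_append_getElem hsarr]
      exact ((hperm.cons _).trans (List.perm_append_singleton _ _).symm)
    have := ih (s+1) arr a'' hlen'' ss hperm'' hdrop'' (by omega)
    have harith : s + 1 + m = s + (m + 1) := by omega
    rw [harith] at this
    exact this

theorem sortingKata_sorted_perm (l : List Char) :
    (sortingKata l).Sorted (· ≤ ·) ∧ List.Perm (sortingKata l) l := by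
  cases l with
  | nil =>
    constructor
    · show List.Pairwise _ _
      simp [sortingKata, createLists]
    · simp [sortingKata, createLists]
  | cons a t =>
    obtain ⟨hs, hp, -⟩ := fold_inv t.length 1 (a :: t) (a :: t) rfl
      (by show List.Pairwise _ _; simp) (List.Perm.refl _) rfl (by simp <;> omega)
    have hr : sortingKata (a :: t) =
        (List.range' 1 t.length).foldl (fun x i => shiftA x i (x.getD i ' ')) (a :: t) := by
      rw [sortingKata, createLists_eq]
      simp
    have hlen : ((List.range' 1 t.length).foldl
        (fun x i => shiftA x i (x.getD i ' ')) (a :: t)).length = t.length + 1 :=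
      foldl_shiftA_length _ _
    have htk : ((List.range' 1 t.length).foldl
        (fun x i => shiftA x i (x.getD i ' ')) (a :: t)).take (1 + t.length) =
        (List.range' 1 t.length).foldl (fun x i => shiftA x i (x.getD i ' ')) (a :: t) :=
      List.take_of_length_le (by omega)
    rw [htk] at hs hp
    have htk2 : (a :: t).take (1 + t.length) = a :: t := List.take_of_length_le (by simp <;> omega)
    rw [htk2] at hp
    rw [hr]
    exact ⟨hs, hp⟩

theorem sortingKata_sorted (l : List Char) : (sortingKata l).Sorted (· ≤ ·) :=
  (sortingKata_sorted_perm l).1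
theorem sortingKata_perm (l : List Char) : List.Perm (sortingKata l) l :=
  (sortingKata_sorted_perm l).2

theorem pencarian_eq (n : Nat) : ∀ (l : List Char), l.length ≤ n → ∀ c,
    pencarian l c = decide (c ∈ l) := by
  induction n with
  | zero =>
    intro l hl c
    have hnil : l = [] := List.eq_nil_of_length_eq_zero (by omega)
    subst hnil
    rw [pencarian]
    simp [sortingKata, createLists]
  | succ n ih =>
    intro l hl c
    rw [pencarian]
    have hperm := sortingKata_perm l
    have hsort := sortingKata_sorted l
    have hlen := sortingKata_length l
    by_cases h0 : (sortingKata l).length = 0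
    · rw [dif_pos h0]
      have hnil : l = [] := List.eq_nil_of_length_eq_zero (by omega)
      subst hnil
      simp
    · rw [dif_neg h0]
      have hm : (sortingKata l).length / 2 < (sortingKata l).length := by omega
      have hgetD : (sortingKata l).getD ((sortingKata l).length / 2) ' ' =
          (sortingKata l)[(sortingKata l).length / 2] := List.getD_eq_getElem _ _ hm
      have hdec : sortingKata l = (sortingKata l).take ((sortingKata l).length / 2) ++
          (sortingKata l)[(sortingKata l).length / 2] ::
          (sortingKata l).drop ((sortingKata l).length / 2 + 1) := by
        conv_lhs => rw [← List.take_append_drop ((sortingKata l).length / 2) (sortingKata l)]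
        rw [List.drop_eq_getElem_cons hm]
      have hs2 : List.Pairwise (· ≤ ·) ((sortingKata l).take ((sortingKata l).length / 2) ++
          (sortingKata l)[(sortingKata l).length / 2] ::
          (sortingKata l).drop ((sortingKata l).length / 2 + 1)) := hdec ▸ hsort
      obtain ⟨hP1, hP2, hP3⟩ := List.pairwise_append.mp hs2
      have hub : ∀ x ∈ (sortingKata l).take ((sortingKata l).length / 2),
          x ≤ (sortingKata l)[(sortingKata l).length / 2] :=
        fun x hx => hP3 x hx _ List.mem_cons_self
      have hlb : ∀ x ∈ (sortingKata l).drop ((sortingKata l).length / 2 + 1),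
          (sortingKata l)[(sortingKata l).length / 2] ≤ x :=
        fun x hx => (List.pairwise_cons.mp hP2).1 x hx
      by_cases he : (sortingKata l)[(sortingKata l).length / 2] = c
      · rw [hgetD, if_pos he]
        have hcl : c ∈ l := hperm.mem_iff.mp (he ▸ (sortingKata l).getElem_mem hm)
        simp [hcl]
      · rw [hgetD, if_neg he]
        by_cases hc : c < (sortingKata l)[(sortingKata l).length / 2]
        · rw [if_pos hc]
          rw [ih ((sortingKata l).take ((sortingKata l).length / 2)) (by simp; omega) c]
          refine decide_eq_decide.mpr ⟨fun hx => hperm.mem_iff.mp (by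
            rw [hdec]; exact List.mem_append_left _ hx), fun hx => ?_⟩
          have hxa : c ∈ sortingKata l := hperm.mem_iff.mpr hx
          rw [hdec] at hxa
          rcases List.mem_append.mp hxa with h | h
          · exact h
          · rcases List.mem_cons.mp h with h | h
            · exact absurd h.symm he
            · exact absurd hc (not_lt.mpr (hlb c h))
        · rw [if_neg hc]
          have hgt : (sortingKata l)[(sortingKata l).length / 2] < c :=
            lt_of_le_of_ne (not_lt.mp hc) he
          rw [ih ((sortingKata l).drop ((sortingKata l).length / 2 + 1)) (by simp; omega) c]
          refine decide_eq_decide.mpr ⟨fun hx => hperm.mem_iff.mp (by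
            rw [hdec]; exact List.mem_append_right _ (List.mem_cons_of_mem _ hx)), fun hx => ?_⟩
          have hxa : c ∈ sortingKata l := hperm.mem_iff.mpr hx
          rw [hdec] at hxa
          rcases List.mem_append.mp hxa with h | h
          · exact absurd hgt (not_lt.mpr (hub c h))
          · rcases List.mem_cons.mp h with h | h
            · exact absurd h.symm he
            · exact h

theorem cekGo_eq (l : List Char) :
    cekGo l = decide (∃ c ∈ l, c ∈ "~!@#$%^&*()_{}'|:;".toList) := by
  induction l with
  | nil => simp [cekGo]
  | cons c rest ih =>
    rw [cekGo, ih]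
    by_cases hc : c ∈ "~!@#$%^&*()_{}'|:;".toList <;> simp [hc]

theorem foldl_neq_check (g : Nat → Bool) : ∀ (idxs : List Nat) (b : Bool),
    idxs.foldl (fun check i => if g i ≠ check then true else check) b = (b || idxs.any g) := by
  intro idxs
  induction idxs with
  | nil => intro b; simp
  | cons i t ihx =>
    intro b
    rw [List.foldl_cons, ihx]
    have hstep : (if g i ≠ b then true else b) = (b || g i) := by
      cases b <;> cases hgi : g i <;> simp [hgi]
    rw [hstep]
    simp [Bool.or_assoc]

-- ===== VERDICT (by name: the statement is the Claim_ definition above) =====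
theorem cek_simbol_spec : Claim_equal_cek_simbol := by
  intro password _
  unfold Spec_cek_simbol cek_simbol cek_simbol_alt
  have hpe : ∀ c, pencarian password.toList c = decide (c ∈ password.toList) :=
    fun c => pencarian_eq password.toList.length password.toList le_rfl c
  rw [foldl_neq_check, cekGo_eq, createLists_eq]
  simp only [Bool.false_or, hpe]
  rw [Bool.eq_iff_iff]
  simp only [List.any_eq_true, List.mem_range, decide_eq_true_eq]
  constructor
  · rintro ⟨i, hi, hmem⟩
    rw [List.getD_eq_getElem _ _ hi] at hmem
    exact ⟨_, hmem, List.getElem_mem hi⟩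
  · rintro ⟨c, hcp, hcs⟩
    obtain ⟨i, hi, hieq⟩ := List.mem_iff_getElem.mp hcs
    exact ⟨i, hi, by rw [List.getD_eq_getElem _ _ hi, hieq]; exact hcp⟩
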